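-- pv_equiv track=rewrite | github.com/lebohangngcombolo-sys/Recruitment | server/scripts/sso_test_script.py | _hub_roles_to_app_role
-- ===== SOURCE A (Python) =====
-- def _hub_roles_to_app_role(roles):
--     """Map hub roles (e.g. ARW - Admin, ARW - Hiring Manager) to app role."""
--     if not roles:
--         return "candidate"
--     roles_lower = [r.lower() if isinstance(r, str) else "" for r in roles]
--     if any("admin" in r for r in roles_lower):
--         return "admin"
--     if any("hr" in r for r in roles_lower):
--         return "hr"
--     if any("manager" in r for r in roles_lower):
--         return "hiring_manager"
--     return "candidate"
-- ===== SOURCE B (Python) =====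
-- _TABLE = ("admin", "hr", "hiring_manager", "candidate")
--
-- def _rank(r):
--     """Priority rank of a single role string: 0=admin, 1=hr, 2=manager, 3=none."""
--     rl = r.lower() if isinstance(r, str) else ""
--     if "admin" in rl:
--         return 0
--     if "hr" in rl:
--         return 1
--     if "manager" in rl:
--         return 2
--     return 3
--
-- def _hub_roles_to_app_role(roles):
--     """Map hub roles to app role: rank each role numerically, reduce by min, index a table."""
--     return _TABLE[min(map(_rank, roles), default=3)]
-- ===== Notes on version B (the rewrite author's own statement) =====
-- stated objective: alternative
-- what changed: Instead of lowering the whole list and running three separate any-scans, B maps each role to a numeric priority rank (0=admin,1=hr,2=manager,3=none), reduces by min, and indexes a fixed table with the result.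
import Mathlib
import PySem

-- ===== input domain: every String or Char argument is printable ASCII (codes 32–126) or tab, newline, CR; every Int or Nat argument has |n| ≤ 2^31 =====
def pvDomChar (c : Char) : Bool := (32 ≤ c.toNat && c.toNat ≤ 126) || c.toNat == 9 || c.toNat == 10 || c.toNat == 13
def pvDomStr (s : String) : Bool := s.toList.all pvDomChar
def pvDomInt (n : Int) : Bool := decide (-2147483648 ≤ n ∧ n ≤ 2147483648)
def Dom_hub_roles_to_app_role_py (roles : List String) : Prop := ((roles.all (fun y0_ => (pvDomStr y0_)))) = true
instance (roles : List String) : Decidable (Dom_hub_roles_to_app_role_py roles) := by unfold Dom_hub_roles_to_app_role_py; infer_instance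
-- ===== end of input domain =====

-- B replaces the lowered copy plus three any-scans by rank-each-role / reduce-by-min / table lookup (objective: alternative).

-- ===== PORT A =====
def hub_roles_to_app_role_py (roles : List String) : String :=
  if roles = [] then "candidate"
  else
    let roles_lower := roles.map (fun r => PySem.Str.lower r)
    if roles_lower.any (fun r => PySem.Str.isIn "admin" r) then "admin"
    else if roles_lower.any (fun r => PySem.Str.isIn "hr" r) then "hr"
    else if roles_lower.any (fun r => PySem.Str.isIn "manager" r) then "hiring_manager"
    else "candidate"

-- ===== PORT B =====
def pvTable : List String := ["admin", "hr", "hiring_manager", "candidate"]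

def pvRank (r : String) : Int :=
  let rl := PySem.Str.lower r
  if PySem.Str.isIn "admin" rl then 0
  else if PySem.Str.isIn "hr" rl then 1
  else if PySem.Str.isIn "manager" rl then 2
  else 3

def hub_roles_to_app_role_py_alt (roles : List String) : String :=
  -- min(map(_rank, roles), default=3)
  let m : Int := match PySem.List.min? (roles.map pvRank) (fun x => x) with
    | none => 3
    | some v => v
  -- _TABLE[m]: m is always in 0..3, so the index is in range and getD never fires
  (PySem.List.pyGet? pvTable m).getD ""

-- ===== PRECONDITION & SPEC =====
def Spec_hub_roles_to_app_role_py (roles : List String) (out : String) : Prop := out = hub_roles_to_app_role_py_alt roles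
instance (roles : List String) (out : String) : Decidable (Spec_hub_roles_to_app_role_py roles out) := by unfold Spec_hub_roles_to_app_role_py; infer_instance

-- ===== CLAIM =====
def Claim_equal_hub_roles_to_app_role_py : Prop := ∀ (roles : List String), Dom_hub_roles_to_app_role_py roles → Spec_hub_roles_to_app_role_py roles (hub_roles_to_app_role_py roles)

-- ===== LEMMAS AND PROOFS =====

-- the priority value A's if-chain computes, as a function of the list
def pvChain (roles : List String) : Int :=
  if roles.any (fun r => PySem.Str.isIn "admin" (PySem.Str.lower r)) then 0
  else if roles.any (fun r => PySem.Str.isIn "hr" (PySem.Str.lower r)) then 1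
  else if roles.any (fun r => PySem.Str.isIn "manager" (PySem.Str.lower r)) then 2
  else 3

theorem pvRank_le (r : String) : pvRank r ≤ 3 := by
  dsimp only [pvRank]; split_ifs <;> omega

-- the priority chain over booleans: head-or-tail tests vs min of the two chains
theorem pv_bool_chain (a1 a2 a3 b1 b2 b3 : Bool) :
    (if (a1 || b1) = true then (0 : Int) else if (a2 || b2) = true then 1
     else if (a3 || b3) = true then 2 else 3)
    = min (if a1 = true then (0 : Int) else if a2 = true then 1 else if a3 = true then 2 else 3)
          (if b1 = true then (0 : Int) else if b2 = true then 1 else if b3 = true then 2 else 3) := by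
  revert a1 a2 a3 b1 b2 b3; decide

theorem pv_rank_chain_cons (r : String) (rs : List String) :
    pvChain (r :: rs) = min (pvRank r) (pvChain rs) := by
  unfold pvChain
  dsimp only [pvRank]
  simp only [List.any_cons]
  exact pv_bool_chain _ _ _ _ _ _

theorem pv_foldl_min {a : Int} (ha : a ≤ 3) (rs : List String) :
    (rs.map pvRank).foldl min a = min a (pvChain rs) := by
  induction rs generalizing a with
  | nil => simp [pvChain, min_eq_left ha]
  | cons r rs ih =>
      rw [List.map_cons, List.foldl_cons,
        ih (le_trans (min_le_right a (pvRank r)) (pvRank_le r)), pv_rank_chain_cons, min_assoc]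

-- the min of the ranks is determined by A's three any-tests
theorem pv_min_rank (roles : List String) :
    (match PySem.List.min? (roles.map pvRank) (fun x => x) with
      | none => (3 : Int)
      | some v => v)
    = (if roles.any (fun r => PySem.Str.isIn "admin" (PySem.Str.lower r)) then 0
       else if roles.any (fun r => PySem.Str.isIn "hr" (PySem.Str.lower r)) then 1
       else if roles.any (fun r => PySem.Str.isIn "manager" (PySem.Str.lower r)) then 2
       else 3) := by
  show _ = pvChain roles
  induction roles with
  | nil => decide
  | cons r rs _ =>
      rw [List.map_cons, PySem.List.min?_id_cons, pv_foldl_min (pvRank_le r), pv_rank_chain_cons]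

-- ===== VERDICT =====
theorem hub_roles_to_app_role_py_spec : Claim_equal_hub_roles_to_app_role_py := by
  intro roles _
  unfold Spec_hub_roles_to_app_role_py hub_roles_to_app_role_py hub_roles_to_app_role_py_alt
  rw [pv_min_rank]
  by_cases h : roles = []
  · subst h; decide
  · simp only [h, if_false, List.any_map, Function.comp_def]
    split_ifs <;> simp [pvTable, PySem.List.pyGet?, PySem.List.pyIdx?]
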